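-- pv_equiv track=rewrite | github.com/AlexTelon/AdventOfCode | 2019/4/solve.py | is_ok
-- ===== SOURCE A (Python) =====
-- import itertools
--
-- def is_ok(num):
--     nums = [int(x) for x in str(num)]
--     found_eq = False
--     for prev, current in zip(nums, nums[1:]):
--         if current < prev:
--             return False
--
--         # part 1
--         # if prev == current:
--         #     found_eq = True
--
--         # part 2
--         groups = [list(g) for k, g in itertools.groupby(nums)]
--         if any(g for g in groups if len(g) == 2):
--             found_eq = True
--
--     return found_eq
-- ===== SOURCE B (Python) =====
-- def is_ok(num):
--     nums = [int(x) for x in str(num)]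
--     if nums != sorted(nums):
--         return False
--     run, found = 1, False
--     for prev, current in zip(nums, nums[1:]):
--         if current == prev:
--             run += 1
--         else:
--             found = found or run == 2
--             run = 1
--     return found or run == 2
-- ===== Notes on version B (the rewrite author's own statement) =====
-- stated objective: simpler
-- what changed: A recomputes the full itertools.groupby decomposition of nums inside every iteration of the pairwise loop; B checks monotonicity once via nums == sorted(nums) and then finds an exactly-length-2 run with a single run-length scan.
import Mathlib
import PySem

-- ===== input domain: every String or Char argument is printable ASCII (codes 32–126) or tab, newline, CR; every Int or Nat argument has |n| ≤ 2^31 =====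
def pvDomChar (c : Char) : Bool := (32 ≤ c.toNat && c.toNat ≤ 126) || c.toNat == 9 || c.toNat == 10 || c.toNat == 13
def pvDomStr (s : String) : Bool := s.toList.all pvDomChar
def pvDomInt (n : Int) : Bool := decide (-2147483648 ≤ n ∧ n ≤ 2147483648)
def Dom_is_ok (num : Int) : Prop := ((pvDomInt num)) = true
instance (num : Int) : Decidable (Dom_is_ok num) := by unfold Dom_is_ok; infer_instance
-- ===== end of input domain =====

-- B replaces A's per-iteration recomputation of the groupby decomposition with one
-- sorted-equality check plus a single run-length scan (objective: simpler).

-- ===== PORT A =====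
-- int(x) for a single char x; total via getD 0 — Pre_is_ok (0 ≤ num) excludes the '-' char
-- on which Python's int(x) raises ValueError.
def pvDigitsA (num : Int) : List Int :=
  (PySem.Int.toStr num).toList.map (fun c => (PySem.Int.ofStr? (String.ofList [c])).getD 0)

-- [list(g) for k, g in itertools.groupby(nums)] (runs of equal adjacent elements)
def pvGroups : List Int → List (List Int)
  | [] => []
  | x :: xs =>
      (x :: xs.takeWhile (fun y => y == x)) :: pvGroups (xs.dropWhile (fun y => y == x))
  termination_by l => l.length
  decreasing_by
    simp only [List.length_cons]
    exact Nat.lt_succ_of_le (List.length_dropWhile_le _ xs)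

-- the for-loop of A: early return on a descent, groups recomputed each iteration
def pvLoopA (nums : List Int) : List (Int × Int) → Bool → Bool
  | [], found_eq => found_eq
  | (prev, current) :: rest, found_eq =>
      if current < prev then false
      else
        let groups := pvGroups nums
        pvLoopA nums rest
          (if groups.any (fun g => g.length == 2 && !g.isEmpty) then true else found_eq)

def is_ok (num : Int) : Bool :=
  let nums := pvDigitsA num
  pvLoopA nums (nums.zip (PySem.List.slice nums (some 1) none)) false

-- ===== PORT B =====
def pvDigitsB (num : Int) : List Int :=
  (PySem.Int.toStr num).toList.map (fun c => (PySem.Int.ofStr? (String.ofList [c])).getD 0)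

-- single run-length scan of B
def pvLoopB : List (Int × Int) → Int → Bool → Bool
  | [], run, found => found || (run == 2)
  | (prev, current) :: rest, run, found =>
      if current == prev then pvLoopB rest (run + 1) found
      else pvLoopB rest 1 (found || (run == 2))

def is_ok_alt (num : Int) : Bool :=
  let nums := pvDigitsB num
  if nums ≠ PySem.List.sorted nums (fun x => x) false then false
  else pvLoopB (nums.zip (PySem.List.slice nums (some 1) none)) 1 false

-- ===== PRECONDITION & SPEC =====
-- Pre_ excludes negative num, on which Python's int(x) over str(num) hits the '-'
-- character and raises ValueError (both A and B raise there).
def Pre_is_ok (num : Int) : Prop := 0 ≤ num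
instance (num : Int) : Decidable (Pre_is_ok num) := by unfold Pre_is_ok; infer_instance
def pvWitness_is_ok : Int := 122

def Spec_is_ok (num : Int) (out : Bool) : Prop := out = is_ok_alt num
instance (num : Int) (out : Bool) : Decidable (Spec_is_ok num out) := by unfold Spec_is_ok; infer_instance

-- ===== CLAIM (what is proved, stated in full; the proofs are below) =====
def Claim_equal_is_ok : Prop := ∀ (num : Int), Dom_is_ok num → Pre_is_ok num → Spec_is_ok num (is_ok num)

-- ===== LEMMAS AND PROOFS =====

-- the exactly-two test A evaluates each iteration (constant over the loop)
def pvG (nums : List Int) : Bool :=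
  (pvGroups nums).any (fun g => g.length == 2 && !g.isEmpty)

-- A's loop = "no descent" && (acc || (loop ran && some group has length 2))
lemma loopA_eq (nums : List Int) :
    ∀ (pairs : List (Int × Int)) (found : Bool),
      pvLoopA nums pairs found =
        (pairs.all (fun pc => !decide (pc.2 < pc.1)) &&
          (found || (!pairs.isEmpty && pvG nums))) := by
  intro pairs
  induction pairs with
  | nil => intro found; simp [pvLoopA]
  | cons pc rest ih =>
      intro found
      obtain ⟨prev, current⟩ := pc
      show pvLoopA nums ((prev, current) :: rest) found = _
      by_cases h : current < prev
      · rw [pvLoopA, if_pos h]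
        simp [List.all_cons, h]
      · rw [pvLoopA, if_neg h, ih]
        cases hG : pvG nums <;>
          simp only [pvG] at hG <;>
          simp [List.all_cons, h, hG]

lemma pairs_cons (x y : Int) (l : List Int) :
    (x :: y :: l).zip ((x :: y :: l).tail) = (x, y) :: (y :: l).zip ((y :: l).tail) := by
  simp

-- B's scan across one maximal run of x (length r-1 consumed so far + t ahead)
lemma loopB_run :
    ∀ (t : List Int) (x : Int) (d : List Int) (r : Int) (found : Bool),
      (∀ y ∈ t, y = x) → (∀ z, d.head? = some z → z ≠ x) →
      pvLoopB ((x :: (t ++ d)).zip ((x :: (t ++ d)).tail)) r found =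
        (match d with
         | [] => found || (r + (t.length : Int) == 2)
         | y :: d' => pvLoopB ((y :: d').zip ((y :: d').tail)) 1
                        (found || (r + (t.length : Int) == 2))) := by
  intro t
  induction t with
  | nil =>
      intro x d r found _ hd
      cases d with
      | nil => simp [pvLoopB]
      | cons y d' =>
          have hyx : ¬ (y = x) := hd y rfl
          rw [show (x :: ([] ++ y :: d')) = x :: y :: d' by simp, pairs_cons]
          simp [pvLoopB, hyx]
  | cons z t' ih =>
      intro x d r found ht hd
      have hzx : z = x := ht z (by simp)
      subst hzx
      rw [show (z :: (z :: t' ++ d)) = z :: z :: (t' ++ d) by simp, pairs_cons]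
      simp only [pvLoopB, if_pos (beq_self_eq_true z)]
      rw [ih z d (r + 1) found (fun y hy => ht y (by simp [hy])) hd]
      have harith : r + 1 + (t'.length : Int) = r + ((z :: t').length : Int) := by
        simp; ring
      rw [harith]

-- B's scan computes exactly A's groupby exactly-two test
lemma loopB_top :
    ∀ (nums : List Int) (found : Bool),
      pvLoopB (nums.zip nums.tail) 1 found = (found || pvG nums) := by
  intro nums
  induction nums using pvGroups.induct with
  | case1 => intro found; simp [pvLoopB, pvG, pvGroups]
  | case2 x xs ih =>
      intro found
      have ht : ∀ y ∈ List.takeWhile (fun y => y == x) xs, y = x := by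
        intro y hy
        exact eq_of_beq (List.mem_takeWhile_imp (p := fun y => y == x) (l := xs) hy)
      have hd : ∀ z, (List.dropWhile (fun y => y == x) xs).head? = some z → z ≠ x := by
        intro z hz
        have hne : List.dropWhile (fun y => y == x) xs ≠ [] := by
          intro hnil; rw [hnil] at hz; cases hz
        have h2 := List.head_dropWhile_not (fun y => y == x) hne
        have hzh : (List.dropWhile (fun y => y == x) xs).head hne = z := by
          rw [List.head?_eq_some_head hne] at hz; exact Option.some.inj hz
        intro hzx
        rw [hzh, hzx] at h2
        simp at h2
      have hG : pvG (x :: xs) =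
          ((((List.takeWhile (fun y => y == x) xs).length + 1 : Nat) == 2) ||
            pvG (List.dropWhile (fun y => y == x) xs)) := by
        simp only [pvG, pvGroups, List.any_cons]
        simp [Nat.add_comm]
      have hcnt : ((1 : Int) + ((List.takeWhile (fun y => y == x) xs).length : Int) == 2) =
          (((List.takeWhile (fun y => y == x) xs).length + 1 : Nat) == 2) := by
        by_cases h : (List.takeWhile (fun y => y == x) xs).length = 1
        · simp [h]
        · simp [h]; omega
      conv_lhs => rw [show xs = List.takeWhile (fun y => y == x) xs ++
        List.dropWhile (fun y => y == x) xs from (List.takeWhile_append_dropWhile).symm]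
      rw [loopB_run _ x _ 1 found ht hd, hG, ← hcnt]
      revert ih
      generalize List.dropWhile (fun y => y == x) xs = d
      intro ih
      cases d with
      | nil => simp [pvG, pvGroups]
      | cons y d' =>
          show pvLoopB ((y :: d').zip (y :: d').tail) 1 _ = _
          rw [ih]
          simp [Bool.or_assoc]

-- B's helper facts: the pairwise-descent test of A is the Chain' of ≤
lemma zip_all_chain' : ∀ (l : List Int),
    ((l.zip l.tail).all (fun pc => !decide (pc.2 < pc.1)) = true) ↔ List.IsChain (· ≤ ·) l := by
  intro l
  induction l with
  | nil => simp
  | cons a l2 ih =>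
      cases l2 with
      | nil => simp
      | cons b l3 =>
          simp only [List.tail_cons] at ih ⊢
          rw [List.zip_cons_cons, List.all_cons, Bool.and_eq_true, ih, List.isChain_cons_cons]
          simp [not_lt]

-- the loop-ran conjunct is absorbed: pvG is false on lists of length ≤ 1
lemma zip_empty_pvG : ∀ (nums : List Int),
    (!(nums.zip nums.tail).isEmpty && pvG nums) = pvG nums := by
  intro nums
  match nums with
  | [] => simp [pvG, pvGroups]
  | [x] => simp [pvG, pvGroups]
  | x :: y :: l => simp

-- A = B on every list of digits
lemma main_eq (nums : List Int) :
    pvLoopA nums (nums.zip (PySem.List.slice nums (some 1) none)) false =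
      (if nums ≠ PySem.List.sorted nums (fun x => x) false then false
       else pvLoopB (nums.zip (PySem.List.slice nums (some 1) none)) 1 false) := by
  rw [PySem.List.slice_from_one]
  rw [loopA_eq, loopB_top]
  by_cases hs : nums = PySem.List.sorted nums (fun x => x) false
  · have hpw : nums.Pairwise (fun a b : Int => a ≤ b) := by
      have h : (PySem.List.sorted nums (fun x => x) false).Pairwise (fun a b : Int => a ≤ b) := by
        simpa using PySem.List.sorted_pairwise (xs := nums) (key := fun x : Int => x)
      rwa [← hs] at h
    have hall : ((nums.zip nums.tail).all (fun pc => !decide (pc.2 < pc.1)) = true) :=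
      (zip_all_chain' nums).mpr (List.isChain_iff_pairwise.mpr hpw)
    rw [if_neg (fun h => h hs)]
    rw [hall]
    simp only [Bool.true_and, Bool.false_or]
    exact zip_empty_pvG nums
  · have hnc : ¬ List.IsChain (· ≤ ·) nums := by
      intro hc
      exact hs (PySem.List.sorted_eq_self_of_pairwise nums (fun x => x)
        (by simpa using List.isChain_iff_pairwise.mp hc)).symm
    have hall : ((nums.zip nums.tail).all (fun pc => !decide (pc.2 < pc.1))) = false := by
      cases h : (nums.zip nums.tail).all (fun pc => !decide (pc.2 < pc.1))
      · rfl
      · exact absurd ((zip_all_chain' nums).mp h) hnc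
    simp [hs, hall]

-- ===== VERDICT (by name: the statement is the Claim_ definition above) =====
theorem is_ok_spec : Claim_equal_is_ok := by
  intro num _ _
  unfold Spec_is_ok
  show is_ok num = is_ok_alt num
  simp only [is_ok, is_ok_alt, pvDigitsA, pvDigitsB]
  exact main_eq _
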